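-- pv_equiv track=rewrite | github.com/AndrewWoodcock/Codewars_Problems | Paul's Misery.py | paul
-- ===== SOURCE A (Python) =====
-- def paul(x: list) -> str:
--     scores = {'kata': 5,
--               'Petes kata': 10,
--               'life': 0,
--               'eating': 1}
--
--     score_sum = sum([scores[val] for val in x])
--     if score_sum < 40:
--         return 'Super happy!'
--     elif score_sum < 70:
--         return 'Happy!'
--     elif score_sum < 100:
--         return 'Sad!'
--     else:
--         return 'Miserable!'
-- ===== SOURCE B (Python) =====
-- SCORES = {'kata': 5, 'Petes kata': 10, 'life': 0, 'eating': 1}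
-- LABELS = ['Super happy!', 'Happy!', 'Sad!', 'Miserable!']
--
-- def paul(x: list) -> str:
--     # Build a multiplicity table first, then take one dot product with the
--     # weights (one score lookup per DISTINCT activity, not per item), and pick
--     # the label by summing threshold comparisons instead of an if/elif chain.
--     counts = {}
--     for val in x:
--         counts[val] = counts.get(val, 0) + 1
--     total = sum(SCORES[k] * n for k, n in counts.items())
--     return LABELS[(total >= 40) + (total >= 70) + (total >= 100)]
-- ===== Notes on version B (the rewrite author's own statement) =====
-- stated objective: alternative
-- what changed: B first builds a multiplicity dict of the input, then computes the score as one dot product of the distinct-activity counts with the weight table (one score lookup per distinct activity instead of per item), and selects the label by indexing with a sum of threshold comparisons instead of an if/elif chain.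
import Mathlib
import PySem

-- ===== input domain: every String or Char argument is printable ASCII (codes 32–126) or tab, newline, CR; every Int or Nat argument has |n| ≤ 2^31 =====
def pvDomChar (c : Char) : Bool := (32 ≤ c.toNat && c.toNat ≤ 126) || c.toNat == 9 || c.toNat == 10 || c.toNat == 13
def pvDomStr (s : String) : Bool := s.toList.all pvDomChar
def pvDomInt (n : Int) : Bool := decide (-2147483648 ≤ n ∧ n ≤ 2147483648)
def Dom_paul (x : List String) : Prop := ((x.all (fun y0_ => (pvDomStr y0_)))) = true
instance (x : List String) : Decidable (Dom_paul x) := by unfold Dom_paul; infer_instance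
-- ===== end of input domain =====

-- B builds a multiplicity dict first and scores it by one dot product with the weight
-- table (a lookup per distinct activity), then indexes the label table by a sum of
-- threshold comparisons.

-- ===== PORT A =====
def paulScores : PySem.Dict String Int :=
  (((PySem.Dict.empty.insert "kata" 5).insert "Petes kata" 10).insert "life" 0).insert "eating" 1

def paul (x : List String) : String :=
  -- sum([scores[val] for val in x]); Pre_ guarantees every key is present (Python raises KeyError otherwise)
  let score_sum : Int := ((x.map (fun val => (paulScores.get? val).getD 0)).foldl (· + ·) 0)
  if score_sum < 40 then "Super happy!"
  else if score_sum < 70 then "Happy!"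
  else if score_sum < 100 then "Sad!"
  else "Miserable!"

-- ===== PORT B =====
def paulLabels : List String := ["Super happy!", "Happy!", "Sad!", "Miserable!"]

def paul_alt (x : List String) : String :=
  let counts : PySem.Dict String Int :=
    x.foldl (fun d v => d.insert v (d.getD v 0 + 1)) PySem.Dict.empty
  -- sum(SCORES[k] * n for k, n in counts.items()); Pre_ guarantees every key is present
  let total : Int :=
    counts.items.foldl (fun acc p => acc + (paulScores.get? p.1).getD 0 * p.2) 0
  let idx : Nat :=
    (if 40 ≤ total then 1 else 0) + (if 70 ≤ total then 1 else 0) + (if 100 ≤ total then 1 else 0)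
  paulLabels.getD idx ""   -- idx ≤ 3 < 4 always, so Python's LABELS[idx] never raises

-- ===== PRECONDITION & SPEC =====
-- Pre_ excludes inputs containing a string that is not one of the four activity keys:
-- there Python A raises KeyError.
def Pre_paul (x : List String) : Prop :=
  ∀ s ∈ x, s = "kata" ∨ s = "Petes kata" ∨ s = "life" ∨ s = "eating"
instance (x : List String) : Decidable (Pre_paul x) := by unfold Pre_paul; infer_instance

def pvWitness_paul : List String := ["kata", "eating", "life", "Petes kata"]

def Spec_paul (x : List String) (out : String) : Prop := out = paul_alt x
instance (x : List String) (out : String) : Decidable (Spec_paul x out) := by unfold Spec_paul; infer_instance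

-- ===== CLAIM =====
def Claim_equal_paul : Prop := ∀ (x : List String), Dom_paul x → Pre_paul x → Spec_paul x (paul x)

-- ===== LEMMAS AND PROOFS =====
theorem paul_foldl_add_sum {α : Type} (g : α → Int) (l : List α) (c : Int) :
    l.foldl (fun acc p => acc + g p) c = c + (l.map g).sum := by
  induction l generalizing c with
  | nil => simp
  | cons b t iht => simp only [List.foldl_cons, List.map_cons, List.sum_cons]; rw [iht]; ring

theorem paul_sum_counts (x : List String) (f : String → Int) :
    ((PySem.Set.ofList x).map (fun k => f k * x.count k)).sum = (x.map f).sum := by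
  have hnd : (PySem.Set.ofList x).Nodup := PySem.Set.nodup_ofList x
  have hfin : (PySem.Set.ofList x).toFinset = x.toFinset := by
    ext k; simp [List.mem_toFinset, PySem.Set.mem_ofList]
  calc ((PySem.Set.ofList x).map (fun k => f k * x.count k)).sum
      = (PySem.Set.ofList x).toFinset.sum (fun k => f k * x.count k) :=
        (List.sum_toFinset _ hnd).symm
    _ = x.toFinset.sum (fun k => f k * x.count k) := by rw [hfin]
    _ = (x.map f).sum := by
        rw [Finset.sum_list_map_count]
        exact Finset.sum_congr rfl (fun m _ => by push_cast [nsmul_eq_mul]; ring)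

-- the two ports compute the same total
theorem paul_total_eq (x : List String) :
    (((x.foldl (fun d v => d.insert v (d.getD v 0 + 1)) PySem.Dict.empty :
        PySem.Dict String Int)).items.foldl
      (fun acc p => acc + (paulScores.get? p.1).getD 0 * p.2) 0)
      = ((x.map (fun val => (paulScores.get? val).getD 0)).foldl (· + ·) 0 : Int) := by
  rw [PySem.Dict.foldl_insert_getD_add_one_eq_counter, PySem.Dict.items_counter,
      paul_foldl_add_sum, List.map_map]
  have := paul_sum_counts x (fun k => (paulScores.get? k).getD 0)
  simp only [Function.comp_def] at *
  rw [this]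
  rw [paul_foldl_add_sum (fun p => p) (x.map fun val => (paulScores.get? val).getD 0) 0]
  simp [Function.comp_def]

-- ===== VERDICT =====
theorem paul_spec : Claim_equal_paul := by
  intro x _ _
  unfold Spec_paul paul paul_alt
  simp only [paul_total_eq]
  set s : Int := (x.map (fun val => (paulScores.get? val).getD 0)).foldl (· + ·) 0 with hs
  by_cases h1 : s < 40
  · simp [paulLabels, h1, show ¬ (40:Int) ≤ s by omega, show ¬ (70:Int) ≤ s by omega,
          show ¬ (100:Int) ≤ s by omega]
  · by_cases h2 : s < 70
    · simp [paulLabels, h1, h2, show (40:Int) ≤ s by omega, show ¬ (70:Int) ≤ s by omega,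
            show ¬ (100:Int) ≤ s by omega]
    · by_cases h3 : s < 100
      · simp [paulLabels, h1, h2, h3, show (40:Int) ≤ s by omega, show (70:Int) ≤ s by omega,
              show ¬ (100:Int) ≤ s by omega]
      · simp [paulLabels, h1, h2, h3, show (40:Int) ≤ s by omega, show (70:Int) ≤ s by omega,
              show (100:Int) ≤ s by omega]
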